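-- pv_equiv track=rewrite | github.com/BERT-Brandeis/mdp_prompt | src/data/reader_doc_qa.py | get_context_sent_map
-- ===== SOURCE A (Python) =====
-- def get_context_sent_map(context, context_sent_idx):
--     flat_context = []
--     sent_map = []
--     token_idx_in_sent_map = []
--     # Context is a list of sentences, each sentence is a list of tokens;
--     # context_sent_idx contains the sent_id in original document for each sent in context.
--     for s_idx, sent in enumerate(context):
--         token_sent_idx = context_sent_idx[s_idx]
--         for t_id, token in enumerate(sent):
--             flat_context.append(token)
--             sent_map.append(token_sent_idx)
--             token_idx_in_sent_map.append(t_id)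
--     return flat_context, sent_map, token_idx_in_sent_map
-- ===== SOURCE B (Python) =====
-- def get_context_sent_map(context, context_sent_idx):
--     # Different algorithm: precompute a sentence-boundary offset table, then walk
--     # the global token positions 0..n-1 once with a moving sentence pointer,
--     # recovering each token, its sentence id and its in-sentence position by
--     # index arithmetic against the offset table.
--     offsets = [0]
--     for sent in context:
--         offsets.append(offsets[-1] + len(sent))
--     n = offsets[-1]
--     ids = [context_sent_idx[i] for i in range(len(context))]
--     flat_context = []
--     sent_map = []
--     token_idx_in_sent_map = []
--     s = 0
--     for t in range(n):
--         while offsets[s + 1] <= t: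
--             s += 1
--         pos = t - offsets[s]
--         flat_context.append(context[s][pos])
--         sent_map.append(ids[s])
--         token_idx_in_sent_map.append(pos)
--     return flat_context, sent_map, token_idx_in_sent_map
-- ===== Notes on version B (the rewrite author's own statement) =====
-- stated objective: alternative
-- what changed: Replaced the nested loop over sentences/tokens appending to three accumulators with an index-arithmetic algorithm: precompute a cumulative sentence-boundary offset table, then a single scan over global token positions 0..n-1 with a moving sentence pointer recovers each token, sentence id and in-sentence position from the offset table.
import Mathlib
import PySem

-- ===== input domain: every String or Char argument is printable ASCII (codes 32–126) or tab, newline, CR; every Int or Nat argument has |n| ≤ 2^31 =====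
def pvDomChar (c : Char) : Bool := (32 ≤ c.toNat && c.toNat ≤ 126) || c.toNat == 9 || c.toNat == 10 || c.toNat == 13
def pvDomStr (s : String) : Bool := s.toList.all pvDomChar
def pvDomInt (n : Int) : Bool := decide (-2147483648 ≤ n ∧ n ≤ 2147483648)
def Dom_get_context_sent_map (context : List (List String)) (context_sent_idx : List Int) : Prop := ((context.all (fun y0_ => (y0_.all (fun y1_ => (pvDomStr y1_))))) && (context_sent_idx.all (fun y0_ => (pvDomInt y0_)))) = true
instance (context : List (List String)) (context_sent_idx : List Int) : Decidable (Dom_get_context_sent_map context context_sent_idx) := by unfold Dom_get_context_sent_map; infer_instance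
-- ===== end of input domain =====

-- B replaces A's nested sentence/token loop with a different algorithm: a precomputed cumulative
-- sentence-boundary offset table plus one scan over global token positions with a moving sentence
-- pointer that recovers token, sentence id and in-sentence position by index arithmetic.


-- ===== PORT A =====
def get_context_sent_map (context : List (List String)) (context_sent_idx : List Int) : List String × List Int × List Int :=
  (PySem.List.enumerate context).foldl
    (fun acc p =>
      let token_sent_idx := (PySem.List.pyGet? context_sent_idx p.1).getD 0
      (PySem.List.enumerate p.2).foldl
        (fun a2 q => (a2.1 ++ [q.2], a2.2.1 ++ [token_sent_idx], a2.2.2 ++ [q.1])) acc)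
    ([], [], [])

-- ===== PORT B =====
-- termination fact for the while-loop helper below (cited in its decreasing_by)
lemma pv_pyGet?_some_lt {α : Type} {xs : List α} {s : Nat} {v : α}
    (h : PySem.List.pyGet? xs ((s : Int) + 1) = some v) : s + 1 < xs.length := by
  have h2 : PySem.List.pyGet? xs (((s + 1 : Nat) : Int)) = some v := by push_cast; exact h
  rw [PySem.List.pyGet?_natCast] at h2
  exact (List.getElem?_eq_some_iff.mp h2).1

-- while offsets[s + 1] <= t: s += 1   (the 'none' branch is where Python would raise IndexError;
-- it is unreachable for the loop's t < offsets[-1])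
def altAdvance (offsets : List Int) (t : Int) (s : Nat) : Nat :=
  match h : PySem.List.pyGet? offsets ((s : Int) + 1) with
  | some v => if v ≤ t then altAdvance offsets t (s + 1) else s
  | none => s
termination_by offsets.length - s
decreasing_by have := pv_pyGet?_some_lt h; omega

-- the body of the `for t in range(n)` loop
def altStep (offsets : List Int) (context : List (List String)) (ids : List Int)
    (st : Nat × List String × List Int × List Int) (t : Int) :
    Nat × List String × List Int × List Int :=
  let s := altAdvance offsets t st.1
  let pos := t - (PySem.List.pyGet? offsets (s : Int)).getD 0
  (s,
   st.2.1 ++ [(PySem.List.pyGet? ((PySem.List.pyGet? context (s : Int)).getD []) pos).getD ""],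
   st.2.2.1 ++ [(PySem.List.pyGet? ids (s : Int)).getD 0],
   st.2.2.2 ++ [pos])

def get_context_sent_map_alt (context : List (List String)) (context_sent_idx : List Int) : List String × List Int × List Int :=
  let offsets := context.foldl (fun o sent => o ++ [(o.getLast?.getD 0) + (sent.length : Int)]) [(0 : Int)]
  let n := offsets.getLast?.getD 0
  let ids := (List.range context.length).map (fun (i : Nat) => (PySem.List.pyGet? context_sent_idx (i : Int)).getD 0)
  let st := (PySem.List.pyRange 0 n).foldl (altStep offsets context ids) (0, [], [], [])
  (st.2.1, st.2.2.1, st.2.2.2)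

-- ===== PRECONDITION & SPEC =====
-- Pre_ excludes exactly the inputs where Python A raises IndexError: context_sent_idx shorter than context.
def Pre_get_context_sent_map (context : List (List String)) (context_sent_idx : List Int) : Prop :=
  context.length ≤ context_sent_idx.length
instance (context : List (List String)) (context_sent_idx : List Int) : Decidable (Pre_get_context_sent_map context context_sent_idx) := by unfold Pre_get_context_sent_map; infer_instance

def pvWitness_get_context_sent_map : List (List String) × List Int := ([["a", "b"], ["c"]], [3, 7])

def Spec_get_context_sent_map (context : List (List String)) (context_sent_idx : List Int) (out : List String × List Int × List Int) : Prop := out = get_context_sent_map_alt context context_sent_idx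
instance (context : List (List String)) (context_sent_idx : List Int) (out : List String × List Int × List Int) : Decidable (Spec_get_context_sent_map context context_sent_idx out) := by unfold Spec_get_context_sent_map; infer_instance

-- ===== CLAIM (what is proved, stated in full; the proofs are below) =====
def Claim_equal_get_context_sent_map : Prop := ∀ (context : List (List String)) (context_sent_idx : List Int), Dom_get_context_sent_map context context_sent_idx → Pre_get_context_sent_map context context_sent_idx → Spec_get_context_sent_map context context_sent_idx (get_context_sent_map context context_sent_idx)

-- ===== LEMMAS AND PROOFS =====

lemma advance_lt (xs : List Int) (t : Int) (s : Nat) (hs : s < xs.length) :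
    altAdvance xs t s < xs.length := by
  fun_induction altAdvance xs t s with
  | case1 s v h htle ih => exact ih (by have := pv_pyGet?_some_lt h; omega)
  | case2 s v h htle => exact hs
  | case3 s h => exact hs

lemma pv_pyGet?_shift {α : Type} (x : α) (xs : List α) (k : Nat) :
    PySem.List.pyGet? (x :: xs) ((k : Int) + 1) = PySem.List.pyGet? xs (k : Int) := by
  have h2 : ((k : Int) + 1) = (((k + 1 : Nat)) : Int) := by push_cast; ring
  rw [h2, PySem.List.pyGet?_natCast, PySem.List.pyGet?_natCast]
  simp

lemma pv_shift_key (T : List Int) (m : Int) (s : Nat) :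
    PySem.List.pyGet? (0 :: (0 :: T).map (fun x => m + x)) (((s + 1 : Nat) : Int) + 1)
      = (PySem.List.pyGet? T ((s : Int))).map (fun x => m + x) := by
  rw [show (((s + 1 : Nat) : Int) + 1) = ((s + 2 : Nat) : Int) by push_cast; ring]
  rw [PySem.List.pyGet?_natCast, PySem.List.pyGet?_natCast]
  simp [List.getElem?_map]

lemma advance_shift (T : List Int) (m t : Int) (s : Nat) :
    altAdvance (0 :: (0 :: T).map (fun x => m + x)) (m + t) (s + 1) = 1 + altAdvance (0 :: T) t s := by
  fun_induction altAdvance (0 :: T) t s with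
  | case1 s v h htle ih =>
      rw [altAdvance]
      rw [pv_pyGet?_shift, PySem.List.pyGet?_natCast] at h
      have hL := pv_shift_key T m s
      rw [PySem.List.pyGet?_natCast, h] at hL
      split
      · next v' heq =>
          rw [hL] at heq
          cases heq
          rw [if_pos (show (fun x => m + x) v ≤ m + t by simp; omega)]
          exact ih
      · next heq => rw [hL] at heq; cases heq
  | case2 s v h htle =>
      rw [altAdvance]
      rw [pv_pyGet?_shift, PySem.List.pyGet?_natCast] at h
      have hL := pv_shift_key T m s
      rw [PySem.List.pyGet?_natCast, h] at hL
      split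
      · next v' heq =>
          rw [hL] at heq
          cases heq
          rw [if_neg (show ¬ (fun x => m + x) v ≤ m + t by simp; omega)]
          omega
      · next heq => rw [hL] at heq; cases heq
  | case3 s h =>
      rw [altAdvance]
      rw [pv_pyGet?_shift, PySem.List.pyGet?_natCast] at h
      have hL := pv_shift_key T m s
      rw [PySem.List.pyGet?_natCast, h] at hL
      split
      · next v' heq => rw [hL] at heq; cases heq
      · next heq => omega

lemma advance_entry (M : List Int) (m t : Int) (ht : 0 ≤ t) :
    altAdvance (0 :: m :: M) (m + t) 0 = altAdvance (0 :: m :: M) (m + t) 1 := by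
  rw [altAdvance]
  split
  · next v heq =>
      rw [show ((0 : Nat) : Int) + 1 = ((1 : Nat) : Int) by norm_num,
        PySem.List.pyGet?_natCast] at heq
      simp at heq
      cases heq
      rw [if_pos (by omega)]
  · next heq =>
      rw [show ((0 : Nat) : Int) + 1 = ((1 : Nat) : Int) by norm_num,
        PySem.List.pyGet?_natCast] at heq
      simp at heq

lemma advance_zero (M : List Int) (m t : Int) (ht : t < m) :
    altAdvance (0 :: m :: M) t 0 = 0 := by
  rw [altAdvance]
  split
  · next v heq =>
      rw [show ((0 : Nat) : Int) + 1 = ((1 : Nat) : Int) by norm_num,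
        PySem.List.pyGet?_natCast] at heq
      simp at heq
      cases heq
      rw [if_neg (by omega)]
  · next heq => rfl

def pvOff : List (List String) → Int → List Int
  | [], _ => []
  | sent :: rest, b => (b + sent.length) :: pvOff rest (b + sent.length)

def pvTotal : List (List String) → Nat
  | [] => 0
  | sent :: rest => sent.length + pvTotal rest

lemma pvOff_fold : ∀ (ctx : List (List String)) (pre : List Int) (b : Int),
    ctx.foldl (fun o sent => o ++ [(o.getLast?.getD 0) + (sent.length : Int)]) (pre ++ [b])
      = (pre ++ [b]) ++ pvOff ctx b
  | [], pre, b => by simp [pvOff]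
  | sent :: rest, pre, b => by
      rw [List.foldl_cons]
      have : (pre ++ [b]).getLast?.getD 0 = b := by simp
      rw [this, show pre ++ [b] ++ [b + (sent.length : Int)] = (pre ++ [b]) ++ [b + (sent.length : Int)] from rfl,
        pvOff_fold rest (pre ++ [b]) (b + (sent.length : Int))]
      simp [pvOff]

lemma pvOff_shift : ∀ (ctx : List (List String)) (c b : Int),
    pvOff ctx (c + b) = (pvOff ctx b).map (fun x => c + x)
  | [], c, b => by simp [pvOff]
  | sent :: rest, c, b => by
      simp only [pvOff, List.map_cons]
      rw [show c + b + (sent.length : Int) = c + (b + (sent.length : Int)) by ring,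
        pvOff_shift rest c (b + (sent.length : Int))]

lemma pvOff_last : ∀ (ctx : List (List String)) (b : Int),
    ((pvOff ctx b).getLast?).getD b = b + (pvTotal ctx : Int)
  | [], b => by simp [pvOff, pvTotal]
  | sent :: rest, b => by
      have := pvOff_last rest (b + (sent.length : Int))
      simp only [pvOff, pvTotal]
      cases h : (pvOff rest (b + (sent.length : Int))).getLast? with
      | none =>
          rw [h] at this
          simp only [List.getLast?_cons, h]
          simp at this ⊢
          omega
      | some v =>
          rw [h] at this
          simp only [List.getLast?_cons, h]
          simp at this ⊢
          omega

lemma phase1 (sent : List String) (rest : List (List String)) (M ids : List Int) :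
    ∀ (ts : List Nat), (∀ i ∈ ts, i < sent.length) → ∀ (fl : List String) (sm tm : List Int),
    (ts.map (fun (i : Nat) => (i : Int))).foldl
        (altStep (0 :: (sent.length : Int) :: M) (sent :: rest) ids) (0, fl, sm, tm)
      = (0, fl ++ ts.map (fun i => sent[i]?.getD ""),
          sm ++ ts.map (fun _ => (PySem.List.pyGet? ids 0).getD 0),
          tm ++ ts.map (fun (i : Nat) => (i : Int)))
  | [], _, fl, sm, tm => by simp
  | i :: ts, h, fl, sm, tm => by
      have hi : i < sent.length := h i (List.mem_cons_self)
      rw [List.map_cons, List.foldl_cons]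
      have hstep : altStep (0 :: (sent.length : Int) :: M) (sent :: rest) ids (0, fl, sm, tm) (i : Int)
          = (0, fl ++ [sent[i]?.getD ""], sm ++ [(PySem.List.pyGet? ids 0).getD 0], tm ++ [(i : Int)]) := by
        have hadv : altAdvance (0 :: (sent.length : Int) :: M) (i : Int) 0 = 0 :=
          advance_zero M _ _ (by exact_mod_cast hi)
        simp only [altStep, hadv, Nat.cast_zero, PySem.List.pyGet?_zero_cons,
          Option.getD_some, sub_zero, PySem.List.pyGet?_natCast]
      rw [hstep, phase1 sent rest M ids ts (fun j hj => h j (List.mem_cons_of_mem _ hj)) _ _ _]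
      simp

lemma sim2 (m : Int) (sent : List String) (rest : List (List String)) (idsL idsR : List Int)
    (hid : ∀ k : Nat, PySem.List.pyGet? idsL ((k : Int) + 1) = PySem.List.pyGet? idsR (k : Int))
    (T : List Int) :
    ∀ (ts : List Int), (∀ t ∈ ts, 0 ≤ t) →
    ∀ (s : Nat), s < (0 :: T).length →
    ∀ (p : Nat), (p = s + 1 ∨ (p = 0 ∧ s = 0)) → ∀ (fl : List String) (sm tm : List Int),
    ((ts.map (fun t => m + t)).foldl
        (altStep (0 :: (0 :: T).map (fun x => m + x)) (sent :: rest) idsL) (p, fl, sm, tm)).2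
      = (ts.foldl (altStep (0 :: T) rest idsR) (s, fl, sm, tm)).2
    ∧ (((ts.map (fun t => m + t)).foldl
        (altStep (0 :: (0 :: T).map (fun x => m + x)) (sent :: rest) idsL) (p, fl, sm, tm)).1
        = (ts.foldl (altStep (0 :: T) rest idsR) (s, fl, sm, tm)).1 + 1
      ∨ (((ts.map (fun t => m + t)).foldl
        (altStep (0 :: (0 :: T).map (fun x => m + x)) (sent :: rest) idsL) (p, fl, sm, tm)).1 = p
        ∧ (ts.foldl (altStep (0 :: T) rest idsR) (s, fl, sm, tm)).1 = s))
  | [], _, s, hs, p, hp, fl, sm, tm => by simp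
  | t :: ts, hts, s, hs, p, hp, fl, sm, tm => by
      have ht : 0 ≤ t := hts t (List.mem_cons_self)
      -- the advanced pointer on the R side
      set s' := altAdvance (0 :: T) t s with hs'def
      have hs' : s' < (0 :: T).length := advance_lt _ _ _ hs
      -- L-side advance lands at s' + 1
      have hadvL : altAdvance (0 :: (0 :: T).map (fun x => m + x)) (m + t) p = s' + 1 := by
        rcases hp with hp | ⟨hp0, hss⟩
        · rw [hp, advance_shift]; omega
        · subst hp0; subst hss
          have hL0 : (0 :: T).map (fun x => m + x) = m :: T.map (fun x => m + x) := by
            simp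
          rw [hL0, advance_entry _ _ _ ht, ← hL0,
            show (1 : Nat) = 0 + 1 from rfl, advance_shift]
          omega
      -- the R-side offset value at s'
      obtain ⟨w, hw⟩ : ∃ w, (0 :: T)[s']? = some w :=
        ⟨(0 :: T)[s'], List.getElem?_eq_getElem hs'⟩
      have hwL : PySem.List.pyGet? ((0 :: T).map (fun x => m + x)) (s' : Int) = some (m + w) := by
        rw [PySem.List.pyGet?_natCast, List.getElem?_map, hw]; rfl
      have hwR : PySem.List.pyGet? (0 :: T) (s' : Int) = some w := by
        rw [PySem.List.pyGet?_natCast, hw]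
      -- one step on each side
      have hstepL : altStep (0 :: (0 :: T).map (fun x => m + x)) (sent :: rest) idsL (p, fl, sm, tm) (m + t)
          = (s' + 1,
             fl ++ [(PySem.List.pyGet? ((PySem.List.pyGet? rest (s' : Int)).getD []) (t - w)).getD ""],
             sm ++ [(PySem.List.pyGet? idsR (s' : Int)).getD 0],
             tm ++ [t - w]) := by
        simp only [altStep, hadvL]
        rw [show ((s' + 1 : Nat) : Int) = (s' : Int) + 1 by push_cast; ring]
        rw [pv_pyGet?_shift, pv_pyGet?_shift, hwL, hid s']
        simp only [Option.getD_some]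
        rw [show m + t - (m + w) = t - w by ring]
      have hstepR : altStep (0 :: T) rest idsR (s, fl, sm, tm) t
          = (s',
             fl ++ [(PySem.List.pyGet? ((PySem.List.pyGet? rest (s' : Int)).getD []) (t - w)).getD ""],
             sm ++ [(PySem.List.pyGet? idsR (s' : Int)).getD 0],
             tm ++ [t - w]) := by
        simp only [altStep, ← hs'def, hwR]
        simp only [Option.getD_some]
      rw [show (t :: ts).map (fun t => m + t) = (m + t) :: ts.map (fun t => m + t) from rfl,
        List.foldl_cons, List.foldl_cons, hstepL, hstepR]
      have IH := sim2 m sent rest idsL idsR hid T ts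
        (fun u hu => hts u (List.mem_cons_of_mem _ hu)) s' hs' (s' + 1) (Or.inl rfl)
        (fl ++ [(PySem.List.pyGet? ((PySem.List.pyGet? rest (s' : Int)).getD []) (t - w)).getD ""])
        (sm ++ [(PySem.List.pyGet? idsR (s' : Int)).getD 0]) (tm ++ [t - w])
      refine ⟨IH.1, ?_⟩
      rcases IH.2 with h2 | ⟨h2a, h2b⟩
      · exact Or.inl h2
      · exact Or.inl (by rw [h2a, h2b])

def pvSmap : List (List String) → List Int → List Int
  | [], _ => []
  | sent :: rest, ids => sent.map (fun _ => (PySem.List.pyGet? ids 0).getD 0) ++ pvSmap rest ids.tail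

lemma pyGet?_tail (ids : List Int) (k : Nat) :
    PySem.List.pyGet? ids ((k : Int) + 1) = PySem.List.pyGet? ids.tail (k : Int) := by
  cases ids with
  | nil => simp [PySem.List.pyGet?, PySem.List.pyIdx?]
  | cons a l => exact pv_pyGet?_shift a l k

lemma map_get_range (l : List String) :
    (List.range l.length).map (fun i => l[i]?.getD "") = l := by
  apply List.ext_getElem
  · simp
  · intro i h1 h2
    simp [List.getElem?_eq_getElem h2]

lemma mainWalk : ∀ (ctx : List (List String)) (ids : List Int) (fl : List String) (sm tm : List Int),
    (((List.range (pvTotal ctx)).map (fun (i : Nat) => (i : Int))).foldl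
        (altStep (0 :: pvOff ctx 0) ctx ids) (0, fl, sm, tm)).2
      = (fl ++ ctx.flatMap (fun s => s), sm ++ pvSmap ctx ids,
         tm ++ ctx.flatMap (fun s => (List.range s.length).map (fun (i : Nat) => (i : Int))))
  | [], ids, fl, sm, tm => by simp [pvTotal, pvSmap]
  | sent :: rest, ids, fl, sm, tm => by
      have m := sent.length
      have hoff : pvOff (sent :: rest) 0
          = (0 :: pvOff rest 0).map (fun x => (sent.length : Int) + x) := by
        show ((0 : Int) + (sent.length : Int)) :: pvOff rest ((0 : Int) + (sent.length : Int)) = _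
        rw [show ((0 : Int) + (sent.length : Int)) = ((sent.length : Int) + 0) by ring, pvOff_shift]
        simp
      rw [show pvTotal (sent :: rest) = sent.length + pvTotal rest from rfl, List.range_add,
        List.map_append, List.foldl_append]
      have h1 := phase1 sent rest ((pvOff rest 0).map (fun x => (sent.length : Int) + x)) ids
        (List.range sent.length) (fun i hi => List.mem_range.mp hi) fl sm tm
      rw [hoff]
      rw [show (0 :: (0 :: pvOff rest 0).map (fun x => (sent.length : Int) + x))
          = 0 :: (sent.length : Int) :: (pvOff rest 0).map (fun x => (sent.length : Int) + x) by simp] at *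
      rw [h1]
      have hts : ∀ t ∈ (List.range (pvTotal rest)).map (fun (i : Nat) => (i : Int)), 0 ≤ t := by
        intro t ht
        simp only [List.mem_map] at ht
        obtain ⟨i, _, rfl⟩ := ht
        positivity
      have hmap : (List.range (pvTotal rest)).map (fun i => ((sent.length + i : Nat) : Int))
          = ((List.range (pvTotal rest)).map (fun (i : Nat) => (i : Int))).map
              (fun t => (sent.length : Int) + t) := by
        rw [List.map_map]
        apply List.map_congr_left
        intro i _
        simp only [Function.comp_apply]
        push_cast
        ring
      rw [show ((List.range (pvTotal rest)).map (fun i => ((sent.length : Nat) + i : Nat))).map (fun (i : Nat) => (i : Int))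
          = (List.range (pvTotal rest)).map (fun i => ((sent.length + i : Nat) : Int)) by rw [List.map_map]; rfl,
        hmap]
      have hsim := sim2 (sent.length : Int) sent rest ids ids.tail (pyGet?_tail ids) (pvOff rest 0)
        ((List.range (pvTotal rest)).map (fun (i : Nat) => (i : Int))) hts 0 (by simp) 0
        (Or.inr ⟨rfl, rfl⟩)
        (fl ++ (List.range sent.length).map (fun i => sent[i]?.getD ""))
        (sm ++ (List.range sent.length).map (fun _ => (PySem.List.pyGet? ids 0).getD 0))
        (tm ++ (List.range sent.length).map (fun (i : Nat) => (i : Int)))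
      rw [show ((0 : Int) :: (0 :: pvOff rest 0).map (fun x => (sent.length : Int) + x))
          = 0 :: ((sent.length : Int) + 0) :: (pvOff rest 0).map (fun x => (sent.length : Int) + x) from by simp] at hsim
      rw [show ((sent.length : Int) + 0) = (sent.length : Int) by ring] at hsim
      rw [hsim.1, mainWalk rest ids.tail _ _ _]
      simp [pvSmap, map_get_range, List.map_const', List.append_assoc]

lemma range_shift (n : Nat) (k : Int) :
    List.map (fun i : Nat => k + (i : Int)) (List.range (n + 1))
      = k :: List.map (fun i : Nat => (k + 1) + (i : Int)) (List.range n) := by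
  rw [List.range_succ_eq_map, List.map_cons, List.map_map]
  congr 1
  · simp
  · apply List.map_congr_left
    intro a _
    simp
    omega

lemma inner_loop (tsi : Int) :
    ∀ (sent : List String) (k : Int) (acc : List String × List Int × List Int),
    (PySem.List.enumerate sent k).foldl
        (fun a2 q => (a2.1 ++ [q.2], a2.2.1 ++ [tsi], a2.2.2 ++ [q.1])) acc
      = (acc.1 ++ sent, acc.2.1 ++ sent.map (fun _ => tsi),
         acc.2.2 ++ (List.range sent.length).map (fun i : Nat => k + (i : Int)))
  | [], k, acc => by simp [PySem.List.enumerate]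
  | x :: t, k, acc => by
      rw [show PySem.List.enumerate (x :: t) k = (k, x) :: PySem.List.enumerate t (k + 1) from rfl,
        List.foldl_cons, inner_loop tsi t (k + 1) _]
      simp only [List.length_cons]
      rw [range_shift t.length k]
      simp

lemma outer_loop (csi : List Int) :
    ∀ (context : List (List String)) (k : Int) (acc : List String × List Int × List Int),
    (PySem.List.enumerate context k).foldl
        (fun acc p =>
          let token_sent_idx := (PySem.List.pyGet? csi p.1).getD 0
          (PySem.List.enumerate p.2).foldl
            (fun a2 q => (a2.1 ++ [q.2], a2.2.1 ++ [token_sent_idx], a2.2.2 ++ [q.1])) acc) acc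
      = (acc.1 ++ context.flatMap (fun sent => sent),
         acc.2.1 ++ (PySem.List.enumerate context k).flatMap
            (fun p => p.2.map (fun _ => (PySem.List.pyGet? csi p.1).getD 0)),
         acc.2.2 ++ context.flatMap (fun sent => PySem.List.pyRange 0 (sent.length : Int)))
  | [], k, acc => by simp [PySem.List.enumerate]
  | sent :: rest, k, acc => by
      rw [show PySem.List.enumerate (sent :: rest) k = (k, sent) :: PySem.List.enumerate rest (k + 1) from rfl,
        List.foldl_cons, inner_loop _ sent 0 acc, outer_loop csi rest (k + 1) _,
        show (fun i : Nat => (0:Int) + (i:Int)) = (fun k : Nat => (k:Int)) from funext (fun i => by simp),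
        ← PySem.List.pyRange_zero_natCast sent.length]
      simp

lemma enum_smap (csi : List Int) :
    ∀ (ctx : List (List String)) (k : Int),
    (PySem.List.enumerate ctx k).flatMap
        (fun p => p.2.map (fun _ => (PySem.List.pyGet? csi p.1).getD 0))
      = pvSmap ctx ((List.range ctx.length).map
          (fun (i : Nat) => (PySem.List.pyGet? csi (k + (i : Int))).getD 0))
  | [], k => by simp [pvSmap]
  | sent :: rest, k => by
      rw [show PySem.List.enumerate (sent :: rest) k = (k, sent) :: PySem.List.enumerate rest (k + 1) from rfl,
        List.flatMap_cons, enum_smap csi rest (k + 1)]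
      simp only [pvSmap, List.length_cons, List.range_succ_eq_map, List.map_cons, List.map_map]
      congr 1
      · apply List.map_congr_left
        intro _ _
        rw [PySem.List.pyGet?_zero_cons]
        simp
      · congr 1
        apply List.map_congr_left
        intro i _
        simp only [Function.comp_apply]
        congr 2
        push_cast
        ring

lemma n_eq (ctx : List (List String)) :
    ((0 : Int) :: pvOff ctx 0).getLast?.getD 0 = (pvTotal ctx : Int) := by
  have h := pvOff_last ctx 0
  cases hh : (pvOff ctx 0).getLast? with
  | none =>
      rw [hh] at h
      cases hc : pvOff ctx 0 with
      | nil => simp at h ⊢; omega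
      | cons a l => rw [hc] at hh; simp [List.getLast?_eq_none_iff] at hh
  | some v =>
      rw [hh] at h
      simp only [List.getLast?_cons, hh]
      simp at h ⊢
      omega

lemma ports_agree (context : List (List String)) (context_sent_idx : List Int) :
    get_context_sent_map context context_sent_idx = get_context_sent_map_alt context context_sent_idx := by
  unfold get_context_sent_map get_context_sent_map_alt
  rw [outer_loop context_sent_idx context 0 ([], [], [])]
  rw [show context.foldl (fun o sent => o ++ [(o.getLast?.getD 0) + (sent.length : Int)]) [(0 : Int)]
      = ([] ++ [(0:Int)]) ++ pvOff context 0 from pvOff_fold context [] 0]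
  simp only [List.nil_append, List.cons_append]
  rw [show ((0:Int) :: pvOff context 0).getLast?.getD 0 = (pvTotal context : Int) from n_eq context,
    PySem.List.pyRange_zero_natCast, mainWalk]
  rw [enum_smap context_sent_idx context 0]
  simp only [List.nil_append, zero_add, PySem.List.pyRange_zero_natCast]

-- ===== VERDICT (by name: the statement is the Claim_ definition above) =====
theorem get_context_sent_map_spec : Claim_equal_get_context_sent_map := by
  intro context context_sent_idx _ _
  unfold Spec_get_context_sent_map
  exact ports_agree context context_sent_idx
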